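-- pv_equiv track=rewrite | github.com/benjm/aoc2021 | day19/solution.py | modifyXYZ
-- ===== SOURCE A (Python) =====
-- def modifyXYZ(xyz,up,rot):
--     x,y,z=xyz
--     if up == 1:
--         x,y,z = -z,y,x
--     elif up == 2:
--         x,y,z = x,-z,y
--     elif up == 3:
--         x,y,z = z,y,-x
--     elif up == 4:
--         x,y,z = x,z,-y
--     elif up == 5:
--         x,y,z = -x,y,-z
--     #rotate
--     while rot>0:
--         rot-=1
--         x,y,z = -y,x,z
--     return (x,y,z)
-- ===== SOURCE B (Python) =====
-- def modifyXYZ(xyz, up, rot):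
--     x, y, z = xyz
--     ups = {1: (-z, y, x), 2: (x, -z, y), 3: (z, y, -x), 4: (x, z, -y), 5: (-x, y, -z)}
--     x, y, z = ups.get(up, (x, y, z))
--     n = (rot if rot > 0 else 0) % 4
--     if n == 1:
--         return (-y, x, z)
--     if n == 2:
--         return (-x, -y, z)
--     if n == 3:
--         return (y, -x, z)
--     return (x, y, z)
-- ===== Notes on version B (the rewrite author's own statement) =====
-- stated objective: faster
-- what changed: The elif chain for 'up' becomes a dict lookup built from the coordinates, and the O(rot) while-loop of quarter turns is replaced by a closed-form case split on (max(rot,0)) % 4.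
import Mathlib
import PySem

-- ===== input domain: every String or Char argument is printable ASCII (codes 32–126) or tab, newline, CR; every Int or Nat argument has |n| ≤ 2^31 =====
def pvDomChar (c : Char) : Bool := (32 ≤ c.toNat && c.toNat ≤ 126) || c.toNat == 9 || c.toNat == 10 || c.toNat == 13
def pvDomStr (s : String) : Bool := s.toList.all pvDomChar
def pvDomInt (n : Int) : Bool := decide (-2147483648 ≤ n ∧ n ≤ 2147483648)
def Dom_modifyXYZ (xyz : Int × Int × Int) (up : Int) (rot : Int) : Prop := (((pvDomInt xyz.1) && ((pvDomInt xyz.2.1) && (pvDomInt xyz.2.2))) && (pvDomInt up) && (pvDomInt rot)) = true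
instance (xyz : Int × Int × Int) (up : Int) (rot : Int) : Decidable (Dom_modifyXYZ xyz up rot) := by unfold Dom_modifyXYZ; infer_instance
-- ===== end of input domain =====

-- B replaces the O(rot) while-loop of quarter turns by a closed-form case split on (max rot 0) % 4, and the elif chain by a dict lookup.

-- ===== PORT A =====
-- the 'while rot>0: rot-=1; x,y,z = -y,x,z' loop of A, step for step
def pvRotLoop (x y z rot : Int) : Int × Int × Int :=
  if rot > 0 then pvRotLoop (-y) x z (rot - 1) else (x, y, z)
termination_by rot.toNat
decreasing_by omega

def modifyXYZ (xyz : Int × Int × Int) (up : Int) (rot : Int) : Int × Int × Int :=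
  let (x, y, z) := xyz
  let (x, y, z) :=
    if up = 1 then (-z, y, x)
    else if up = 2 then (x, -z, y)
    else if up = 3 then (z, y, -x)
    else if up = 4 then (x, z, -y)
    else if up = 5 then (-x, y, -z)
    else (x, y, z)
  pvRotLoop x y z rot

-- ===== PORT B =====
def modifyXYZ_alt (xyz : Int × Int × Int) (up : Int) (rot : Int) : Int × Int × Int :=
  let (x, y, z) := xyz
  let ups : PySem.Dict Int (Int × Int × Int) :=
    PySem.Dict.ofList [(1, (-z, y, x)), (2, (x, -z, y)), (3, (z, y, -x)), (4, (x, z, -y)), (5, (-x, y, -z))]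
  let (x, y, z) := ups.getD up (x, y, z)
  let n := PySem.Int.mod (if rot > 0 then rot else 0) 4
  if n = 1 then (-y, x, z)
  else if n = 2 then (-x, -y, z)
  else if n = 3 then (y, -x, z)
  else (x, y, z)

-- ===== PRECONDITION & SPEC =====
def Spec_modifyXYZ (xyz : Int × Int × Int) (up : Int) (rot : Int) (out : Int × Int × Int) : Prop := out = modifyXYZ_alt xyz up rot
instance (xyz : Int × Int × Int) (up : Int) (rot : Int) (out : Int × Int × Int) : Decidable (Spec_modifyXYZ xyz up rot out) := by unfold Spec_modifyXYZ; infer_instance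

-- ===== CLAIM (what is proved, stated in full; the proofs are below) =====
def Claim_equal_modifyXYZ : Prop := ∀ (xyz : Int × Int × Int) (up : Int) (rot : Int), Dom_modifyXYZ xyz up rot → Spec_modifyXYZ xyz up rot (modifyXYZ xyz up rot)

-- ===== LEMMAS AND PROOFS =====

-- A's rotation loop equals B's closed form on (max rot 0) % 4
theorem pvRotLoop_closed (rot x y z : Int) :
    pvRotLoop x y z rot =
      (if PySem.Int.mod (if rot > 0 then rot else 0) 4 = 1 then (-y, x, z)
       else if PySem.Int.mod (if rot > 0 then rot else 0) 4 = 2 then (-x, -y, z)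
       else if PySem.Int.mod (if rot > 0 then rot else 0) 4 = 3 then (y, -x, z)
       else (x, y, z)) := by
  by_cases h : rot > 0
  · by_cases h4 : 4 ≤ rot
    · have ih := pvRotLoop_closed (rot - 4) (- -x) (- -y) z
      rw [pvRotLoop, if_pos h, pvRotLoop, if_pos (by omega), pvRotLoop, if_pos (by omega),
        pvRotLoop, if_pos (by omega)]
      have hstep : rot - 1 - 1 - 1 - 1 = rot - 4 := by omega
      have hm : PySem.Int.mod (if rot - 4 > 0 then rot - 4 else 0) 4
          = PySem.Int.mod (if rot > 0 then rot else 0) 4 := by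
        by_cases h5 : rot - 4 > 0
        · rw [if_pos h, if_pos h5, PySem.Int.mod_eq_emod_of_pos (by norm_num),
            PySem.Int.mod_eq_emod_of_pos (by norm_num)]
          exact Int.sub_emod_right rot 4
        · have h6 : rot = 4 := by omega
          subst h6
          decide
      rw [hstep, ih, hm]
      simp only [neg_neg]
    · interval_cases rot
      · rw [pvRotLoop, if_pos (by omega), pvRotLoop, if_neg (by omega), if_pos (by decide)]
      · rw [pvRotLoop, if_pos (by omega), pvRotLoop, if_pos (by omega), pvRotLoop,
          if_neg (by omega), if_neg (by decide), if_pos (by decide)]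
      · rw [pvRotLoop, if_pos (by omega), pvRotLoop, if_pos (by omega), pvRotLoop,
          if_pos (by omega), pvRotLoop, if_neg (by omega), if_neg (by decide),
          if_neg (by decide), if_pos (by decide)]
        simp only [neg_neg]
  · rw [pvRotLoop, if_neg h, if_neg h, if_neg (by decide), if_neg (by decide), if_neg (by decide)]
termination_by rot.toNat
decreasing_by omega

-- B's dict lookup for 'up' equals A's elif chain
theorem pvUps_getD (up x y z : Int) :
    (PySem.Dict.ofList [((1:Int), (-z, y, x)), (2, (x, -z, y)), (3, (z, y, -x)), (4, (x, z, -y)), (5, (-x, y, -z))]).getD up (x, y, z)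
      = (if up = 1 then (-z, y, x)
         else if up = 2 then (x, -z, y)
         else if up = 3 then (z, y, -x)
         else if up = 4 then (x, z, -y)
         else if up = 5 then (-x, y, -z)
         else (x, y, z)) := by
  split_ifs with h1 h2 h3 h4 h5
  · subst h1; rfl
  · subst h2; rfl
  · subst h3; rfl
  · subst h4; rfl
  · subst h5; rfl
  · simp [PySem.Dict.ofList, PySem.Dict.update, PySem.Dict.insert, PySem.Dict.getD,
      PySem.Dict.get?, PySem.Dict.empty, List.find?,
      beq_eq_false_iff_ne.mpr (Ne.symm h1), beq_eq_false_iff_ne.mpr (Ne.symm h2),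
      beq_eq_false_iff_ne.mpr (Ne.symm h3), beq_eq_false_iff_ne.mpr (Ne.symm h4),
      beq_eq_false_iff_ne.mpr (Ne.symm h5)]

-- ===== VERDICT (by name: the statement is the Claim_ definition above) =====
theorem modifyXYZ_spec : Claim_equal_modifyXYZ := by
  intro ⟨x, y, z⟩ up rot _
  show modifyXYZ (x, y, z) up rot = modifyXYZ_alt (x, y, z) up rot
  simp only [modifyXYZ, modifyXYZ_alt, pvUps_getD, pvRotLoop_closed]
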